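-- pv_equiv track=rewrite | github.com/image-multithresholding/Image-multithresholding | src/image_multi_thresholding/base.py | _gray_clustering
-- ===== SOURCE A (Python) =====
-- from typing import List, Dict, Tuple, Callable
--
-- def _gray_clustering(levels: int, breakPositions: List[int], levelsOffset: int = 0) -> List[List[int]]:
--     clusters = [[]]
--
--     # Iterate over every level.
--     for x in range(levelsOffset, levelsOffset + levels):
--         # If we have to break at this level, start a new list.
--         if x - 1 in breakPositions:
--             clusters.append([x])
--         # If not, just add this level to the last created cluster.
--         else:
--             clusters[-1].append(x)
--
--     return clusters
-- ===== SOURCE B (Python) =====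
-- from typing import List
--
-- def _gray_clustering(levels: int, breakPositions: List[int], levelsOffset: int = 0) -> List[List[int]]:
--     breaks = set(breakPositions)
--     levelList = list(range(levelsOffset, levelsOffset + levels))
--     cuts = [i for i in range(levels) if levelsOffset + i - 1 in breaks]
--     bounds = [0] + cuts + [levels]
--     return [levelList[bounds[j]:bounds[j + 1]] for j in range(len(bounds) - 1)]
-- ===== Notes on version B (the rewrite author's own statement) =====
-- stated objective: faster
-- what changed: Replaces the per-level append-to-last-cluster loop (with an O(m) list membership test per level) by a two-pass boundary computation: build a break set once, compute cut indices, then produce each cluster as a slice of the materialized level list.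
import Mathlib
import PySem

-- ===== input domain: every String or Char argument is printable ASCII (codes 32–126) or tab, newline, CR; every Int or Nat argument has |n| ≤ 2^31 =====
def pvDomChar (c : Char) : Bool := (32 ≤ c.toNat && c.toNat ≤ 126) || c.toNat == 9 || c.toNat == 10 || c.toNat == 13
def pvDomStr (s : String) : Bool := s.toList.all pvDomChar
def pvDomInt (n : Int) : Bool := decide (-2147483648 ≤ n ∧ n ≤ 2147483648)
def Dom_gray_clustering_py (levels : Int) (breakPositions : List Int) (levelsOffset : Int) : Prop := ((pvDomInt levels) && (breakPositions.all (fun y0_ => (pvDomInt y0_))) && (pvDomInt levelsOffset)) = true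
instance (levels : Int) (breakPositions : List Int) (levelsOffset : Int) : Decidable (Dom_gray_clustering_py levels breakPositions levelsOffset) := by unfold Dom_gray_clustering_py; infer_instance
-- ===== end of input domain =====

-- B replaces A's per-level append-to-last-cluster loop (list membership test per level) by a
-- two-pass boundary computation (break set + cut indices, clusters produced as slices); faster.

-- ===== PORT A =====
-- loop body of A: at a break start a new cluster, else append x to the last cluster
def pvStepA (bp : List Int) (clusters : List (List Int)) (x : Int) : List (List Int) :=
  if (x - 1) ∈ bp then clusters ++ [[x]]
  else clusters.dropLast ++ [(clusters.getLast?.getD []) ++ [x]]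

def gray_clustering_py (levels : Int) (breakPositions : List Int) (levelsOffset : Int) : List (List Int) :=
  (PySem.List.pyRange levelsOffset (levelsOffset + levels) 1).foldl (pvStepA breakPositions) [[]]

-- ===== PORT B =====
def gray_clustering_py_alt (levels : Int) (breakPositions : List Int) (levelsOffset : Int) : List (List Int) :=
  let breaks : PySem.Set Int := PySem.Set.ofList breakPositions
  let levelList := PySem.List.pyRange levelsOffset (levelsOffset + levels) 1
  let cuts := (PySem.List.pyRange 0 levels 1).filter
      (fun i => PySem.Set.contains breaks (levelsOffset + i - 1))
  let bounds := [(0 : Int)] ++ cuts ++ [levels]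
  (PySem.List.pyRange 0 ((bounds.length : Int) - 1) 1).map
    (fun j => PySem.List.slice levelList (some (PySem.List.pyGetD bounds j 0))
                                         (some (PySem.List.pyGetD bounds (j + 1) 0)))

-- ===== PRECONDITION & SPEC =====
def Spec_gray_clustering_py (levels : Int) (breakPositions : List Int) (levelsOffset : Int) (out : List (List Int)) : Prop := out = gray_clustering_py_alt levels breakPositions levelsOffset
instance (levels : Int) (breakPositions : List Int) (levelsOffset : Int) (out : List (List Int)) : Decidable (Spec_gray_clustering_py levels breakPositions levelsOffset out) := by unfold Spec_gray_clustering_py; infer_instance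

-- ===== CLAIM (what is proved, stated in full; the proofs are below) =====
def Claim_equal_gray_clustering_py : Prop := ∀ (levels : Int) (breakPositions : List Int) (levelsOffset : Int), Dom_gray_clustering_py levels breakPositions levelsOffset → Spec_gray_clustering_py levels breakPositions levelsOffset (gray_clustering_py levels breakPositions levelsOffset)

-- ===== LEMMAS AND PROOFS =====

-- common specification: clusters of a list of levels, first cluster open
def pvConsFirst (x : Int) : List (List Int) → List (List Int)
  | [] => [[x]]
  | c :: cs => (x :: c) :: cs

def pvSpec (bp : List Int) : List Int → List (List Int)
  | [] => [[]]
  | x :: xs => if (x - 1) ∈ bp then [] :: pvConsFirst x (pvSpec bp xs) else pvConsFirst x (pvSpec bp xs)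

def pvConsPre (c : List Int) : List (List Int) → List (List Int)
  | [] => [c]
  | d :: ds => (c ++ d) :: ds

-- adjacent-pair slices of xs at a list of boundaries
def pvAdj (xs : List Int) : List Int → List (List Int)
  | a :: b :: r => PySem.List.slice xs (some a) (some b) :: pvAdj xs (b :: r)
  | _ => []

-- ---- A side ----

theorem pvFoldA_append (bp : List Int) (xs : List Int) :
    ∀ (cs : List (List Int)) (c : List Int),
    xs.foldl (pvStepA bp) (cs ++ [c]) = cs ++ xs.foldl (pvStepA bp) [c] := by
  induction xs with
  | nil => intro cs c; simp
  | cons x xs ih =>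
    intro cs c
    by_cases h : (x - 1) ∈ bp
    · simp only [List.foldl_cons, pvStepA, h, ite_true]
      rw [ih (cs ++ [c]) [x], ih [c] [x], List.append_assoc]
    · simp only [List.foldl_cons, pvStepA, h, ite_false, List.dropLast_concat,
        List.getLast?_concat, Option.getD_some]
      rw [ih cs (c ++ [x])]
      rfl

theorem pvConsPre_single (x : Int) (S : List (List Int)) :
    pvConsPre [x] S = pvConsFirst x S := by
  cases S <;> simp [pvConsPre, pvConsFirst]

theorem pvConsPre_consFirst (c : List Int) (x : Int) (S : List (List Int)) :
    pvConsPre c (pvConsFirst x S) = pvConsPre (c ++ [x]) S := by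
  cases S <;> simp [pvConsPre, pvConsFirst]

theorem pvFoldA_spec (bp : List Int) (xs : List Int) :
    ∀ c, xs.foldl (pvStepA bp) [c] = pvConsPre c (pvSpec bp xs) := by
  induction xs with
  | nil => intro c; simp [pvSpec, pvConsPre]
  | cons x xs ih =>
    intro c
    by_cases h : (x - 1) ∈ bp
    · simp only [List.foldl_cons, pvStepA, h, ite_true]
      rw [show ([c] ++ [[x]] : List (List Int)) = [c] ++ [[x]] from rfl,
        pvFoldA_append bp xs [c] [x], ih [x], pvConsPre_single]
      simp [pvSpec, h, pvConsPre]
    · simp only [List.foldl_cons, pvStepA, h, ite_false,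
        List.getLast?_singleton, Option.getD_some]
      rw [show ([c] : List (List Int)).dropLast ++ [c ++ [x]] = [c ++ [x]] from rfl]
      rw [ih (c ++ [x])]
      simp [pvSpec, h, pvConsPre_consFirst]

theorem pvSpec_ne_nil (bp : List Int) (xs : List Int) : pvSpec bp xs ≠ [] := by
  cases xs with
  | nil => simp [pvSpec]
  | cons x xs =>
    simp only [pvSpec]
    split <;> cases h : pvSpec bp xs <;> simp [pvConsFirst]

theorem pvA_eq_spec (bp : List Int) (xs : List Int) :
    xs.foldl (pvStepA bp) [[]] = pvSpec bp xs := by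
  rw [pvFoldA_spec bp xs []]
  cases h : pvSpec bp xs with
  | nil => exact absurd h (pvSpec_ne_nil bp xs)
  | cons d ds => simp [pvConsPre]

-- ---- B side ----

theorem pvAdj_range (xs : List Int) :
    ∀ (bs : List Int) (a : Int),
    (List.range bs.length).map (fun k =>
        PySem.List.slice xs (some ((a :: bs).getD k 0)) (some ((a :: bs).getD (k + 1) 0)))
      = pvAdj xs (a :: bs) := by
  intro bs
  induction bs with
  | nil => intro a; simp [pvAdj]
  | cons b r ih =>
    intro a
    rw [List.length_cons, List.range_succ_eq_map, List.map_cons, List.map_map]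
    show _ :: (List.range r.length).map _ = _
    rw [show pvAdj xs (a :: b :: r) = PySem.List.slice xs (some a) (some b) :: pvAdj xs (b :: r) from rfl,
      ← ih b]
    congr 1

theorem pvAdj_pyRange (xs : List Int) (bs : List Int) :
    (PySem.List.pyRange 0 ((bs.length : Int) - 1) 1).map
        (fun j => PySem.List.slice xs (some (PySem.List.pyGetD bs j 0))
                                      (some (PySem.List.pyGetD bs (j + 1) 0)))
      = pvAdj xs bs := by
  cases bs with
  | nil =>
    rw [PySem.List.pyRange_one_eq_nil (by norm_num)]
    simp [pvAdj]
  | cons a bs =>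
    have hlen : ((a :: bs).length : Int) - 1 = (bs.length : Int) := by
      simp
    rw [hlen, PySem.List.pyRange_one]
    simp only [Int.sub_zero, Int.toNat_natCast, List.map_map]
    rw [← pvAdj_range xs bs a]
    apply List.map_congr_left
    intro k hk
    simp only [Function.comp_apply, Int.zero_add]
    rw [show ((k : Int) + 1) = ((k + 1 : Nat) : Int) by push_cast; ring]
    rw [PySem.List.pyGetD_natCast, PySem.List.pyGetD_natCast]

theorem pvSlice_cons (x : Int) (xs : List Int) (a b : Int) (ha : 0 ≤ a) (hb : 0 ≤ b) :
    PySem.List.slice (x :: xs) (some (a + 1)) (some (b + 1))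
      = PySem.List.slice xs (some a) (some b) := by
  rw [PySem.List.slice_toNat _ (by omega) (by omega), PySem.List.slice_toNat _ ha hb]
  rw [show (a + 1).toNat = a.toNat + 1 by omega, show (b + 1).toNat = b.toNat + 1 by omega]
  simp [List.drop_succ_cons, Nat.succ_sub_succ]

theorem pvAdj_shift (x : Int) (xs : List Int) :
    ∀ bs : List Int, (∀ b ∈ bs, 0 ≤ b) →
    pvAdj (x :: xs) (bs.map (· + 1)) = pvAdj xs bs := by
  intro bs
  induction bs with
  | nil => intro _; simp [pvAdj]
  | cons a t ih =>
    intro hnn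
    cases t with
    | nil => simp [pvAdj]
    | cons b r =>
      have ha : 0 ≤ a := hnn a (by simp)
      have hb : 0 ≤ b := hnn b (by simp)
      simp only [List.map_cons]
      rw [show pvAdj (x :: xs) ((a+1) :: (b+1) :: r.map (· + 1)) =
            PySem.List.slice (x :: xs) (some (a+1)) (some (b+1)) ::
              pvAdj (x :: xs) ((b+1) :: r.map (· + 1)) from rfl]
      rw [show ((b+1) :: r.map (· + 1)) = (b :: r).map (· + 1) from rfl]
      rw [ih (fun y hy => hnn y (List.mem_cons_of_mem a hy)), pvSlice_cons x xs a b ha hb]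
      rfl

theorem pvSlice_cons_zero (x : Int) (xs : List Int) (b : Int) (hb : 0 ≤ b) :
    PySem.List.slice (x :: xs) (some 0) (some (b + 1))
      = x :: PySem.List.slice xs (some 0) (some b) := by
  rw [PySem.List.slice_toNat _ (by omega) (by omega), PySem.List.slice_toNat _ (by omega) hb]
  rw [show (b + 1).toNat = b.toNat + 1 by omega]
  simp

theorem pvAdj_step (x : Int) (xs : List Int) (L : List Int)
    (hne : L ≠ []) (hnn : ∀ b ∈ L, 0 ≤ b) :
    pvAdj (x :: xs) ((0 : Int) :: L.map (· + 1)) = pvConsFirst x (pvAdj xs ((0 : Int) :: L)) := by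
  cases L with
  | nil => exact absurd rfl hne
  | cons l0 lr =>
    have h0 : 0 ≤ l0 := hnn l0 (by simp)
    simp only [List.map_cons]
    rw [show pvAdj (x :: xs) ((0:Int) :: (l0+1) :: lr.map (· + 1)) =
          PySem.List.slice (x :: xs) (some 0) (some (l0+1)) ::
            pvAdj (x :: xs) ((l0+1) :: lr.map (· + 1)) from rfl]
    rw [show ((l0+1) :: lr.map (· + 1)) = (l0 :: lr).map (· + 1) from rfl]
    rw [pvAdj_shift x xs (l0 :: lr) (fun y hy => hnn y hy)]
    rw [pvSlice_cons_zero x xs l0 h0]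
    rfl

theorem pvRange_shift (n : Nat) :
    PySem.List.pyRange 1 ((n : Int) + 1) 1 = (PySem.List.pyRange 0 (n : Int) 1).map (· + 1) := by
  rw [PySem.List.pyRange_one, PySem.List.pyRange_one]
  simp only [List.map_map]
  rw [show ((n : Int) + 1 - 1).toNat = n by omega, show ((n : Int) - 0).toNat = n by omega]
  apply List.map_congr_left
  intro k _
  simp only [Function.comp_apply]
  ring

theorem pvMain (bp : List Int) :
    ∀ (n : Nat) (off : Int),
    pvAdj (PySem.List.pyRange off (off + (n : Int)) 1)
        ((0 : Int) :: ((PySem.List.pyRange 0 (n : Int) 1).filter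
            (fun i => decide ((off + i - 1) ∈ bp)) ++ [(n : Int)]))
      = pvSpec bp (PySem.List.pyRange off (off + (n : Int)) 1) := by
  intro n
  induction n with
  | zero =>
    intro off
    simp only [Nat.cast_zero]
    rw [PySem.List.pyRange_one_eq_nil (by omega), PySem.List.pyRange_one_eq_nil (by norm_num)]
    simp only [List.filter_nil, List.nil_append]
    rw [show pvAdj ([] : List Int) [(0:Int), 0] =
          PySem.List.slice ([] : List Int) (some 0) (some 0) :: pvAdj ([] : List Int) [(0:Int)] from rfl]
    rw [PySem.List.slice_toNat _ (by omega) (by omega)]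
    simp [pvAdj, pvSpec]
  | succ n ih =>
    intro off
    rw [show ((n + 1 : Nat) : Int) = (n : Int) + 1 by push_cast; ring]
    have hxs : PySem.List.pyRange off (off + ((n : Int) + 1)) 1
        = off :: PySem.List.pyRange (off + 1) ((off + 1) + (n : Int)) 1 := by
      rw [PySem.List.pyRange_one_cons (by omega)]
      congr 1
      congr 1
      ring
    have hcuts : PySem.List.pyRange 0 ((n : Int) + 1) 1
        = 0 :: (PySem.List.pyRange 0 (n : Int) 1).map (· + 1) := by
      rw [PySem.List.pyRange_one_cons (by omega), ← pvRange_shift n]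
      norm_num
    have hfilt : ∀ i ∈ PySem.List.pyRange 0 (n : Int) 1,
        decide ((off + (i + 1) - 1) ∈ bp) = decide (((off + 1) + i - 1) ∈ bp) := by
      intro i _
      have : off + (i + 1) - 1 = (off + 1) + i - 1 := by ring
      rw [this]
    set xs := PySem.List.pyRange (off + 1) ((off + 1) + (n : Int)) 1 with hxsdef
    set L := (PySem.List.pyRange 0 (n : Int) 1).filter
        (fun i => decide (((off + 1) + i - 1) ∈ bp)) ++ [(n : Int)] with hLdef
    have hLne : L ≠ [] := by simp [hLdef]
    have hLnn : ∀ b ∈ L, 0 ≤ b := by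
      intro b hb
      rw [hLdef] at hb
      rcases List.mem_append.mp hb with h | h
      · have := List.mem_filter.mp h
        have := (PySem.List.mem_pyRange_one).mp this.1
        omega
      · simp at h; omega
    have hmapfilt : (((PySem.List.pyRange 0 (n : Int) 1).map (· + 1)).filter
          (fun i => decide ((off + i - 1) ∈ bp))) ++ [(n : Int) + 1]
        = L.map (· + 1) := by
      rw [List.filter_map, hLdef, List.map_append, List.map_singleton]
      congr 1
      refine congrArg _ ?_
      apply List.filter_congr
      intro i hi
      simpa [Function.comp] using hfilt i hi
    by_cases h : (off - 1) ∈ bp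
    · -- break at the first level: leading empty cluster
      rw [hxs, hcuts]
      rw [List.filter_cons]
      simp only [show (off + (0:Int) - 1) = off - 1 by ring, h, decide_true, if_true]
      rw [List.cons_append, hmapfilt]
      rw [show ((0:Int) :: (0:Int) :: L.map (· + 1)) = [(0:Int)] ++ (0 :: L.map (· + 1)) from rfl]
      rw [show pvAdj (off :: xs) ([(0:Int)] ++ ((0:Int) :: L.map (· + 1))) =
            PySem.List.slice (off :: xs) (some 0) (some 0) ::
              pvAdj (off :: xs) ((0:Int) :: L.map (· + 1)) from rfl]
      rw [PySem.List.slice_toNat _ (by omega) (by omega)]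
      rw [pvAdj_step off xs L hLne hLnn]
      rw [hLdef, ih (off + 1)]
      simp [pvSpec, h, hxsdef]
    · rw [hxs, hcuts]
      rw [List.filter_cons]
      simp only [show (off + (0:Int) - 1) = off - 1 by ring, h, decide_false,
        Bool.false_eq_true, if_false]
      rw [hmapfilt]
      rw [pvAdj_step off xs L hLne hLnn]
      rw [hLdef, ih (off + 1)]
      simp [pvSpec, h, hxsdef]

theorem pvContains_eq (bp : List Int) (y : Int) :
    PySem.Set.contains (PySem.Set.ofList bp) y = decide (y ∈ bp) := by
  by_cases h : y ∈ bp
  · simp only [h, decide_true]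
    exact (PySem.Set.contains_iff _ _).mpr ((PySem.Set.mem_ofList _ _).mpr h)
  · simp only [h, decide_false]
    rw [Bool.eq_false_iff]
    intro hc
    exact h ((PySem.Set.mem_ofList _ _).mp ((PySem.Set.contains_iff _ _).mp hc))

-- ===== VERDICT (by name: the statement is the Claim_ definition above) =====
theorem gray_clustering_py_spec : Claim_equal_gray_clustering_py := by
  intro levels bp off _
  unfold Spec_gray_clustering_py gray_clustering_py
  simp only [gray_clustering_py_alt]
  rw [pvA_eq_spec bp]
  by_cases hl : 0 ≤ levels
  · -- levels = (levels.toNat : Int)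
    obtain ⟨n, hn⟩ : ∃ n : Nat, levels = (n : Int) := ⟨levels.toNat, by omega⟩
    subst hn
    rw [show ∀ l : List Int, l.filter (fun i => PySem.Set.contains (PySem.Set.ofList bp) (off + i - 1))
          = l.filter (fun i => decide ((off + i - 1) ∈ bp)) from
        fun l => List.filter_congr (fun i _ => pvContains_eq bp (off + i - 1))]
    rw [show ([(0:Int)] ++ (PySem.List.pyRange 0 (n : Int) 1).filter
            (fun i => decide ((off + i - 1) ∈ bp)) ++ [(n : Int)] : List Int)
          = (0 : Int) :: ((PySem.List.pyRange 0 (n : Int) 1).filter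
            (fun i => decide ((off + i - 1) ∈ bp)) ++ [(n : Int)]) by simp]
    rw [pvAdj_pyRange, pvMain bp n off]
  · -- negative levels: empty range, single empty slice
    rw [PySem.List.pyRange_one_eq_nil (show off + levels ≤ off by omega),
      PySem.List.pyRange_one_eq_nil (show levels ≤ 0 by omega)]
    simp only [List.filter_nil, List.singleton_append]
    rw [show (([(0:Int), levels] : List Int).length : Int) - 1 = 1 by simp]
    rw [show PySem.List.pyRange 0 1 1 = [0] from by decide]
    simp only [List.map_cons, List.map_nil]
    rw [show PySem.List.pyGetD ([(0:Int), levels] : List Int) 0 0 = 0 from rfl,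
      show PySem.List.pyGetD ([(0:Int), levels] : List Int) (0 + 1) 0 = levels from rfl]
    simp [pvSpec, PySem.List.slice]
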